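-- pv_equiv track=rewrite | github.com/AliceEom/AI_MCN | app.py | _parse_strategy_blocks
-- ===== SOURCE A (Python) =====
-- def _parse_strategy_blocks(markdown_text: str) -> list[tuple[str, str]]:
--     text = str(markdown_text or "").strip()
--     if not text:
--         return []
--     lines = text.splitlines()
--     blocks: list[tuple[str, list[str]]] = []
--     current_title = "Strategy"
--     current_body: list[str] = []
--
--     for raw in lines:
--         line = raw.rstrip()
--         if line.startswith("## "):
--             if current_body:
--                 blocks.append((current_title, current_body))
--             current_title = line.replace("## ", "").strip()
--             current_body = []
--         else:
--             current_body.append(line)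
--
--     if current_body:
--         blocks.append((current_title, current_body))
--
--     clean_blocks = []
--     for title, body_lines in blocks:
--         body = "\n".join([b for b in body_lines if b.strip()]).strip()
--         if body:
--             clean_blocks.append((title, body))
--     return clean_blocks[:6]
-- ===== SOURCE B (Python) =====
-- def _segments(title, lines):
--     body_lines = []
--     rest = lines
--     while rest and not rest[0].startswith("## "):
--         body_lines.append(rest[0])
--         rest = rest[1:]
--     body = "\n".join(l for l in body_lines if l.strip()).strip()
--     if not rest:
--         return [(title, body)]
--     return [(title, body)] + _segments(rest[0].replace("## ", "").strip(), rest[1:])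
--
--
-- def _parse_strategy_blocks(markdown_text: str) -> list[tuple[str, str]]:
--     text = str(markdown_text or "").strip()
--     if not text:
--         return []
--     lines = [l.rstrip() for l in text.splitlines()]
--     return [(t, b) for t, b in _segments("Strategy", lines) if b][:6]
-- ===== Notes on version B (the rewrite author's own statement) =====
-- stated objective: alternative
-- what changed: A's single accumulator loop carrying mutable (current_title, current_body, blocks) state plus a separate cleaning pass is replaced by a recursive splitter: span the lines up to the next '## ' header, clean that segment immediately, and recurse on the tail; the final result is a filtered comprehension over the segments.
import Mathlib
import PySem

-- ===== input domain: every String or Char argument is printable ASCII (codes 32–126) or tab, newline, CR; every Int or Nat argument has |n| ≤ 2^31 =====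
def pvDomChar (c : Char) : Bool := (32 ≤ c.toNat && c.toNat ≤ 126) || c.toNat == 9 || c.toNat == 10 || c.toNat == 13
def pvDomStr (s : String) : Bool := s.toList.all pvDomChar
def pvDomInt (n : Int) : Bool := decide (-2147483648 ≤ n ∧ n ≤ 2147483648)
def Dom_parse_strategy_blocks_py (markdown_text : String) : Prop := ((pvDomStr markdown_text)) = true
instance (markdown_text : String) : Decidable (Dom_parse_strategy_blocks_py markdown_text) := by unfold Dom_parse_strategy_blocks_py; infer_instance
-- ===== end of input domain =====

-- B replaces A's single accumulator loop (mutable title/body/blocks state) by a recursive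
-- splitter: span to the next '## ' header, clean the segment, recurse on the tail (objective: alternative).

-- the literal "## " and the shared per-segment cleaning step "\n".join([b for b in body if b.strip()]).strip()
def pvHH : List Char := ['#', '#', ' ']

def pvCleanBody (bl : List (List Char)) : List Char :=
  PySem.Chars.strip (PySem.Chars.join ['\n'] (bl.filter (fun b => !(PySem.Chars.strip b).isEmpty)))

-- ===== PORT A =====
-- one step of A's 'for raw in lines' loop; state = (current_title, current_body, blocks)
def pvAStep (st : List Char × List (List Char) × List (List Char × List (List Char)))
    (raw : List Char) : List Char × List (List Char) × List (List Char × List (List Char)) :=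
  let line := PySem.Chars.rstrip raw
  if PySem.Chars.startswith line pvHH then
    let blocks := if st.2.1 ≠ [] then st.2.2 ++ [(st.1, st.2.1)] else st.2.2
    (PySem.Chars.strip (PySem.Chars.replace line pvHH []), ([], blocks))
  else
    (st.1, (st.2.1 ++ [line], st.2.2))

def parse_strategy_blocks_py (markdown_text : String) : List (String × String) :=
  let text := PySem.Chars.strip markdown_text.toList
  if text = [] then []
  else
    let lines := PySem.Chars.splitlines text
    let st := lines.foldl pvAStep ("Strategy".toList, ([], []))
    let blocks := if st.2.1 ≠ [] then st.2.2 ++ [(st.1, st.2.1)] else st.2.2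
    let clean := blocks.foldl (fun acc tb =>
      let body := pvCleanBody tb.2
      if body ≠ [] then acc ++ [(tb.1, body)] else acc) []
    (clean.take 6).map (fun tb => (String.ofList tb.1, String.ofList tb.2))

-- ===== PORT B =====
-- B's while loop: split lines at the first '## ' header (body_lines, rest)
def pvBSpan : List (List Char) → List (List Char) × List (List Char)
  | [] => ([], [])
  | l :: rest =>
    if PySem.Chars.startswith l pvHH then ([], l :: rest)
    else
      let p := pvBSpan rest
      (l :: p.1, p.2)

theorem pvBSpan_snd_len (ls : List (List Char)) : (pvBSpan ls).2.length ≤ ls.length := by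
  induction ls with
  | nil => simp [pvBSpan]
  | cons l rest ih =>
    simp only [pvBSpan]
    split
    · simp
    · simpa using Nat.le_succ_of_le ih

-- B's recursive _segments: emit (title, cleaned body), recurse past the next header (if any)
def pvBSegments (title : List Char) (lines : List (List Char)) : List (List Char × List Char) :=
  let p := pvBSpan lines
  let body := pvCleanBody p.1
  if hr : p.2 = [] then [(title, body)]
  else
    (title, body) ::
      pvBSegments (PySem.Chars.strip (PySem.Chars.replace (p.2.head hr) pvHH [])) p.2.tail
termination_by lines.length
decreasing_by
  have hle := pvBSpan_snd_len lines
  rcases h : (pvBSpan lines).2 with _ | ⟨hd, tl⟩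
  · exact absurd h hr
  · rw [h] at hle
    simp only [List.length_cons] at hle
    simp only [List.tail_cons]
    omega

def parse_strategy_blocks_py_alt (markdown_text : String) : List (String × String) :=
  let text := PySem.Chars.strip markdown_text.toList
  if text = [] then []
  else
    let lines := (PySem.Chars.splitlines text).map PySem.Chars.rstrip
    (((pvBSegments "Strategy".toList lines).filter (fun tb => !tb.2.isEmpty)).take 6).map
      (fun tb => (String.ofList tb.1, String.ofList tb.2))

-- ===== PRECONDITION & SPEC =====
def Spec_parse_strategy_blocks_py (markdown_text : String) (out : List (String × String)) : Prop := out = parse_strategy_blocks_py_alt markdown_text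
instance (markdown_text : String) (out : List (String × String)) : Decidable (Spec_parse_strategy_blocks_py markdown_text out) := by unfold Spec_parse_strategy_blocks_py; infer_instance

-- ===== CLAIM (what is proved, stated in full; the proofs are below) =====
def Claim_equal_parse_strategy_blocks_py : Prop := ∀ (markdown_text : String), Dom_parse_strategy_blocks_py markdown_text → Spec_parse_strategy_blocks_py markdown_text (parse_strategy_blocks_py markdown_text)

-- ===== LEMMAS AND PROOFS =====

-- recursive characterisation of A's loop: the blocks it emits from state (title, body) on `lines`
def pvARaw (title : List Char) (body : List (List Char)) :
    List (List Char) → List (List Char × List (List Char))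
  | [] => if body ≠ [] then [(title, body)] else []
  | raw :: rest =>
    let line := PySem.Chars.rstrip raw
    if PySem.Chars.startswith line pvHH then
      (if body ≠ [] then [(title, body)] else []) ++
        pvARaw (PySem.Chars.strip (PySem.Chars.replace line pvHH [])) [] rest
    else
      pvARaw title (body ++ [line]) rest

-- A's trailing 'if current_body: blocks.append(...)'
def pvFinish (st : List Char × List (List Char) × List (List Char × List (List Char))) :
    List (List Char × List (List Char)) :=
  if st.2.1 ≠ [] then st.2.2 ++ [(st.1, st.2.1)] else st.2.2

theorem pvAStep_foldl (lines : List (List Char)) :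
    ∀ (title : List Char) (body : List (List Char)) (blocks : List (List Char × List (List Char))),
    pvFinish (List.foldl pvAStep (title, (body, blocks)) lines)
      = blocks ++ pvARaw title body lines := by
  induction lines with
  | nil =>
    intro t b bl
    simp only [List.foldl_nil, pvFinish, pvARaw]
    split_ifs <;> simp
  | cons raw rest ih =>
    intro t b bl
    rw [List.foldl_cons]
    by_cases h1 : PySem.Chars.startswith (PySem.Chars.rstrip raw) pvHH = true
    · by_cases h2 : b ≠ []
      · simp only [pvAStep, if_pos h1, if_pos h2]
        rw [ih]
        simp [pvARaw, h1, h2]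
      · simp only [pvAStep, if_pos h1, if_neg h2]
        rw [ih]
        simp [pvARaw, h1, h2]
    · simp only [pvAStep, if_neg h1]
      rw [ih]
      simp [pvARaw, h1]

-- recursive characterisation of A's cleaning loop
def pvClean : List (List Char × List (List Char)) → List (List Char × List Char)
  | [] => []
  | tb :: rest =>
    (if pvCleanBody tb.2 ≠ [] then [(tb.1, pvCleanBody tb.2)] else []) ++ pvClean rest

theorem pvClean_foldl (bs : List (List Char × List (List Char)))
    : ∀ (acc : List (List Char × List Char)),
    bs.foldl (fun acc tb =>
      let body := pvCleanBody tb.2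
      if body ≠ [] then acc ++ [(tb.1, body)] else acc) acc = acc ++ pvClean bs := by
  induction bs with
  | nil => intro acc; simp [pvClean]
  | cons tb rest ih =>
    intro acc
    simp only [List.foldl_cons, pvClean]
    split_ifs with h
    · rw [ih]; simp
    · rw [ih]; simp

theorem pvClean_append (a b : List (List Char × List (List Char))) :
    pvClean (a ++ b) = pvClean a ++ pvClean b := by
  induction a with
  | nil => simp [pvClean]
  | cons tb rest ih => simp [pvClean, ih]

theorem pvCleanBody_nil : pvCleanBody [] = [] := by decide

theorem pvBSpan_cons_header {l : List Char} (ls : List (List Char))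
    (h : PySem.Chars.startswith l pvHH = true) : pvBSpan (l :: ls) = ([], l :: ls) := by
  simp [pvBSpan, h]

theorem pvBSpan_cons_nonheader {l : List Char} (ls : List (List Char))
    (h : ¬ PySem.Chars.startswith l pvHH = true) :
    pvBSpan (l :: ls) = (l :: (pvBSpan ls).1, (pvBSpan ls).2) := by
  simp [pvBSpan, h]

-- pvBSegments with a pending body carried into the first segment
def pvSegs (title : List Char) (carry : List (List Char)) (lines : List (List Char)) :
    List (List Char × List Char) :=
  let p := pvBSpan lines
  let body := pvCleanBody (carry ++ p.1)
  if hr : p.2 = [] then [(title, body)]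
  else
    (title, body) ::
      pvSegs (PySem.Chars.strip (PySem.Chars.replace (p.2.head hr) pvHH [])) [] p.2.tail
termination_by lines.length
decreasing_by
  have hle := pvBSpan_snd_len lines
  rcases h : (pvBSpan lines).2 with _ | ⟨hd, tl⟩
  · exact absurd h hr
  · rw [h] at hle
    simp only [List.length_cons] at hle
    simp only [List.tail_cons]
    omega

theorem pvSegs_eq_pvBSegments (n : ℕ) : ∀ (lines : List (List Char)), lines.length ≤ n →
    ∀ title, pvSegs title [] lines = pvBSegments title lines := by
  induction n with
  | zero =>
    intro lines hlen title
    have h0 : lines = [] := List.eq_nil_of_length_eq_zero (Nat.le_zero.mp hlen)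
    subst h0
    rw [pvSegs, pvBSegments]
    simp [pvBSpan]
  | succ n ih =>
    intro lines hlen title
    rw [pvSegs, pvBSegments]
    simp only [List.nil_append]
    by_cases hr : (pvBSpan lines).2 = []
    · simp [hr]
    · simp only [dif_neg hr]
      have hle := pvBSpan_snd_len lines
      have htl : (pvBSpan lines).2.tail.length ≤ n := by
        rcases h : (pvBSpan lines).2 with _ | ⟨hd, tl⟩
        · exact absurd h hr
        · rw [h] at hle
          simp only [List.length_cons] at hle
          simp only [List.tail_cons] at hlen ⊢
          omega
      rw [ih _ htl]

theorem pvSegs_cons_header {l : List Char} (ls : List (List Char))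
    (h : PySem.Chars.startswith l pvHH = true) (title : List Char) (carry : List (List Char)) :
    pvSegs title carry (l :: ls)
      = (title, pvCleanBody carry) ::
          pvSegs (PySem.Chars.strip (PySem.Chars.replace l pvHH [])) [] ls := by
  rw [pvSegs, pvBSpan_cons_header ls h]
  simp

theorem pvSegs_cons_nonheader {l : List Char} (ls : List (List Char))
    (h : ¬ PySem.Chars.startswith l pvHH = true) (title : List Char) (carry : List (List Char)) :
    pvSegs title carry (l :: ls) = pvSegs title (carry ++ [l]) ls := by
  conv_lhs => rw [pvSegs]
  conv_rhs => rw [pvSegs]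
  simp only [pvBSpan_cons_nonheader ls h, List.append_assoc, List.singleton_append]

-- main bridge: A's emitted-and-cleaned blocks = B's segments (with pending carry), filtered
theorem pvMain (lines : List (List Char)) :
    ∀ (title : List Char) (carry : List (List Char)),
    pvClean (pvARaw title carry lines)
      = (pvSegs title carry (lines.map PySem.Chars.rstrip)).filter (fun tb => !tb.2.isEmpty) := by
  induction lines with
  | nil =>
    intro title carry
    rw [pvSegs]
    simp only [List.map_nil, pvBSpan, List.append_nil]
    by_cases hc : carry = []
    · subst hc
      simp [pvARaw, pvClean, pvCleanBody_nil]
    · simp only [pvARaw, if_pos hc, pvClean, List.append_nil]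
      by_cases hb : pvCleanBody carry = []
      · simp [hb]
      · simp [hb]
  | cons raw rest ih =>
    intro title carry
    simp only [pvARaw, List.map_cons]
    by_cases h : PySem.Chars.startswith (PySem.Chars.rstrip raw) pvHH = true
    · rw [if_pos h, pvClean_append, pvSegs_cons_header _ h, ih]
      by_cases hc : carry = []
      · subst hc
        simp [pvClean, pvCleanBody_nil]
      · simp only [if_pos hc, pvClean, List.append_nil]
        by_cases hb : pvCleanBody carry = []
        · simp [hb]
        · simp [hb]
    · rw [if_neg h, pvSegs_cons_nonheader _ h]
      exact ih _ _

-- ===== VERDICT (by name: the statement is the Claim_ definition above) =====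
theorem parse_strategy_blocks_py_spec : Claim_equal_parse_strategy_blocks_py := by
  intro md _
  unfold Spec_parse_strategy_blocks_py parse_strategy_blocks_py parse_strategy_blocks_py_alt
  by_cases ht : PySem.Chars.strip md.toList = []
  · simp [ht]
  · simp only [if_neg ht]
    have hfin : ∀ st : List Char × List (List Char) × List (List Char × List (List Char)),
        (if st.2.1 ≠ [] then st.2.2 ++ [(st.1, st.2.1)] else st.2.2) = pvFinish st :=
      fun _ => rfl
    rw [pvClean_foldl, hfin, pvAStep_foldl, List.nil_append, List.nil_append, pvMain,
      pvSegs_eq_pvBSegments ((PySem.Chars.splitlines (PySem.Chars.strip md.toList)).map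
        PySem.Chars.rstrip).length _ le_rfl]
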